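-- pv_equiv track=rewrite | github.com/JuanMartinFajardo/muson_line | mus_mecanicas.py | get_pares_info
-- ===== SOURCE A (Python) =====
-- from collections import Counter
--
-- def get_valores_mus(cartas):
--     # Los 3 son Reyes (12) y los 2 son Ases (1)
--     return [12 if c['valor'] == 3 else (1 if c['valor'] == 2 else c['valor']) for c in cartas]
--
-- def get_pares_info(cartas):
--     valores = get_valores_mus(cartas)
--     counts = Counter(valores)
--
--     # Filtramos solo los que tienen pareja o más
--     pares = [[val, count] for val, count in counts.items() if count >= 2]
--
--     if not pares:
--         return {'tipo': 0, 'premio': 0}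
--
--     if len(pares) == 1:
--         val, count = pares[0]
--         if count == 2: return {'tipo': 1, 'v1': val, 'premio': 1} # Par
--         if count == 3: return {'tipo': 2, 'v1': val, 'premio': 2} # Trío
--         if count == 4: return {'tipo': 3, 'v1': val, 'v2': val, 'premio': 3} # Dúplex (4 iguales)
--
--     if len(pares) == 2:
--         mayor = max(pares[0][0], pares[1][0])
--         menor = min(pares[0][0], pares[1][0])
--         return {'tipo': 3, 'v1': mayor, 'v2': menor, 'premio': 3} # Dúplex (2 parejas)
-- ===== SOURCE B (Python) =====
-- def get_valores_mus(cartas):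
--     # Los 3 son Reyes (12) y los 2 son Ases (1)
--     return [12 if c['valor'] == 3 else (1 if c['valor'] == 2 else c['valor']) for c in cartas]
--
-- def get_pares_info(cartas):
--     # Sort the mus values descending and collect equal runs of length >= 2 in ONE pass
--     # (no frequency dict): runs come out ordered from the highest value down.
--     runs = []
--     prev, n = None, 0
--     for v in sorted(get_valores_mus(cartas), reverse=True):
--         if n > 0 and v == prev:
--             n += 1
--         else:
--             if n >= 2:
--                 runs.append((prev, n))
--             prev, n = v, 1
--     if n >= 2:
--         runs.append((prev, n))
--     # Classification as a decision table on the run pattern.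
--     match runs:
--         case []:
--             return {'tipo': 0, 'premio': 0}
--         case [(v, 2)]:
--             return {'tipo': 1, 'v1': v, 'premio': 1}
--         case [(v, 3)]:
--             return {'tipo': 2, 'v1': v, 'premio': 2}
--         case [(v, 4)]:
--             return {'tipo': 3, 'v1': v, 'v2': v, 'premio': 3}
--         case [(v1, _), (v2, _)]:
--             return {'tipo': 3, 'v1': v1, 'v2': v2, 'premio': 3}
--         case _:
--             return None
-- ===== Notes on version B (the rewrite author's own statement) =====
-- stated objective: alternative
-- what changed: B builds no frequency dict at all: it sorts the mus values descending and extracts equal runs of length >= 2 in one linear accumulator pass, then classifies by pattern-matching the run list (so the two-pair branch reads v1/v2 positionally instead of max/min and the single-group ladder is a decision table on (value, runlength)).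
-- outside the precondition, e.g. on get_pares_info([{}]): A raises KeyError, B raises KeyError
import Mathlib
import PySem

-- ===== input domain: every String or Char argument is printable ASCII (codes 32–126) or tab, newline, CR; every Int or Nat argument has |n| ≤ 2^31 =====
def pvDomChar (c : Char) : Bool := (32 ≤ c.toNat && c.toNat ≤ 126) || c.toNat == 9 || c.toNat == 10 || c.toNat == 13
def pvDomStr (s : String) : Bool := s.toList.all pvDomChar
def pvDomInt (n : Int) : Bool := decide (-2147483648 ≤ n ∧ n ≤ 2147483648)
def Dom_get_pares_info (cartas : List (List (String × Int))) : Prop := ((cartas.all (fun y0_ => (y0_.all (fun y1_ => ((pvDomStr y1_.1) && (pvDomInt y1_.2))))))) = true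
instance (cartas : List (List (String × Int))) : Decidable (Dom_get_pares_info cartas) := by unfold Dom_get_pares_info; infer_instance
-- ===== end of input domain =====

-- B replaces A's Counter by a single run-length pass over the descending-sorted mus values
-- and classifies by pattern-matching the run list (objective: alternative).

-- ===== PORT A =====
-- get_valores_mus: shared module helper (c['valor'] looked up as first match; Pre_ guarantees the key exists — Python raises KeyError otherwise)
def get_valores_mus (cartas : List (List (String × Int))) : List Int :=
  cartas.map (fun c =>
    let v := (PySem.Dict.mk c).getD "valor" 0
    if v = 3 then 12 else if v = 2 then 1 else v)

-- A's classification ladder, transliterated (the final [] is Python's implicit None, excluded by Pre_)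
def clasifica_pares (pares : List (Int × Int)) : List (String × Int) :=
  if pares = [] then [("tipo", 0), ("premio", 0)]
  else
    match (if pares.length = 1 then
             (let val := (PySem.List.pyGetD pares 0 (0, 0)).1
              let count := (PySem.List.pyGetD pares 0 (0, 0)).2
              if count = 2 then some [("tipo", 1), ("v1", val), ("premio", 1)]
              else if count = 3 then some [("tipo", 2), ("v1", val), ("premio", 2)]
              else if count = 4 then some [("tipo", 3), ("v1", val), ("v2", val), ("premio", 3)]
              else none)
           else none) with
    | some r => r
    | none =>
      if pares.length = 2 then
        let mayor := max (PySem.List.pyGetD pares 0 (0, 0)).1 (PySem.List.pyGetD pares 1 (0, 0)).1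
        let menor := min (PySem.List.pyGetD pares 0 (0, 0)).1 (PySem.List.pyGetD pares 1 (0, 0)).1
        [("tipo", 3), ("v1", mayor), ("v2", menor), ("premio", 3)]
      else []  -- Python returns None here (excluded by Pre_)

def get_pares_info (cartas : List (List (String × Int))) : List (String × Int) :=
  let valores := get_valores_mus cartas
  let counts := PySem.Dict.counter valores
  let pares := counts.items.filter (fun p => decide (2 ≤ p.2))
  clasifica_pares pares

-- ===== PORT B =====
-- the run-length accumulator loop of Source B (prev, n are the loop state; emits runs of length ≥ 2)
def runAcc (prev n : Int) : List Int → List (Int × Int)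
  | [] => if 2 ≤ n then [(prev, n)] else []
  | v :: rest =>
    if v = prev then runAcc prev (n + 1) rest
    else (if 2 ≤ n then [(prev, n)] else []) ++ runAcc v 1 rest

def runsOf (l : List Int) : List (Int × Int) :=
  match l with
  | [] => []
  | v :: rest => runAcc v 1 rest

-- Source B's match-based decision table (the [] arms are Python's None, excluded by Pre_)
def clasifica_pares_alt (runs : List (Int × Int)) : List (String × Int) :=
  match runs with
  | [] => [("tipo", 0), ("premio", 0)]
  | [(v, c)] =>
    if c = 2 then [("tipo", 1), ("v1", v), ("premio", 1)]
    else if c = 3 then [("tipo", 2), ("v1", v), ("premio", 2)]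
    else if c = 4 then [("tipo", 3), ("v1", v), ("v2", v), ("premio", 3)]
    else []
  | [(v1, _), (v2, _)] => [("tipo", 3), ("v1", v1), ("v2", v2), ("premio", 3)]
  | _ => []

def get_pares_info_alt (cartas : List (List (String × Int))) : List (String × Int) :=
  clasifica_pares_alt (runsOf (PySem.List.sorted (get_valores_mus cartas) (fun x => x) true))

-- ===== PRECONDITION & SPEC =====
-- Pre_ excludes inputs on which the Python A does not return a dict: hands with a card lacking
-- the 'valor' key (KeyError) and hands on which A falls off the end returning None (a single
-- matched value occurring five or more times, or three or more distinct paired values).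
def Pre_get_pares_info (cartas : List (List (String × Int))) : Prop :=
  (∀ c ∈ cartas, (PySem.Dict.mk c).contains "valor" = true) ∧
  ((PySem.List.dedup (get_valores_mus cartas)).filter
      (fun v => decide (2 ≤ ((get_valores_mus cartas).count v : Int)))).length ≤ 2 ∧
  (((PySem.List.dedup (get_valores_mus cartas)).filter
      (fun v => decide (2 ≤ ((get_valores_mus cartas).count v : Int)))).length = 1 →
    ∀ v ∈ get_valores_mus cartas, ((get_valores_mus cartas).count v : Int) ≤ 4)
instance (cartas : List (List (String × Int))) : Decidable (Pre_get_pares_info cartas) := by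
  unfold Pre_get_pares_info; infer_instance

def pvWitness_get_pares_info : (List (List (String × Int))) :=
  [[("valor", 4)], [("valor", 4)], [("valor", 7)], [("valor", 3)]]

def Spec_get_pares_info (cartas : List (List (String × Int))) (out : List (String × Int)) : Prop := out = get_pares_info_alt cartas
instance (cartas : List (List (String × Int))) (out : List (String × Int)) : Decidable (Spec_get_pares_info cartas out) := by unfold Spec_get_pares_info; infer_instance

-- ===== CLAIM (what is proved, stated in full; the proofs are below) =====
def Claim_equal_get_pares_info : Prop := ∀ (cartas : List (List (String × Int))), Dom_get_pares_info cartas → Pre_get_pares_info cartas → Spec_get_pares_info cartas (get_pares_info cartas)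

-- ===== LEMMAS AND PROOFS =====

lemma perm_pair_cases {α : Type} {x y a b : α} (h : ([x, y] : List α).Perm [a, b]) :
    (x = a ∧ y = b) ∨ (x = b ∧ y = a) := by
  have hx : x ∈ ([a, b] : List α) := h.mem_iff.mp (by simp)
  have hx2 : x = a ∨ x = b := by simpa using hx
  rcases hx2 with rfl | rfl
  · left
    exact ⟨rfl, by simpa using List.Perm.eq_singleton (List.Perm.cons_inv h)⟩
  · right
    refine ⟨rfl, ?_⟩
    have h2 : ([y] : List α).Perm [a] := List.Perm.cons_inv (h.trans (List.Perm.swap x a []))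
    simpa using List.Perm.eq_singleton h2

lemma runAcc_char : ∀ (l : List Int) (prev n : Int),
    (∀ x ∈ l, x ≤ prev) → l.Pairwise (· ≥ ·) →
    runAcc prev n l =
      (if 2 ≤ n + (l.count prev : Int) then [(prev, n + (l.count prev : Int))] else []) ++
        runsOf (l.filter (fun x => x ≠ prev)) := by
  intro l
  induction l with
  | nil => intro prev n _ _; simp [runAcc, runsOf]
  | cons w rest ih =>
    intro prev n hle hpw
    rcases List.pairwise_cons.mp hpw with ⟨hwrest, hrest⟩
    by_cases hwp : w = prev
    · subst hwp
      rw [show runAcc w n (w :: rest) = runAcc w (n + 1) rest from by simp [runAcc]]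
      rw [ih w (n + 1) hwrest hrest]
      have hc : ((w :: rest).count w : Int) = (rest.count w : Int) + 1 := by
        simp
      have hf : (w :: rest).filter (fun x => x ≠ w) = rest.filter (fun x => x ≠ w) := by
        simp
      have harith : n + 1 + (rest.count w : Int) = n + ((rest.count w : Int) + 1) := by ring
      rw [hc, hf, ← harith]
    · have hwlt : w < prev := lt_of_le_of_ne (hle w (by simp)) hwp
      have hnomem : prev ∉ (w :: rest) := by
        intro hm
        rcases List.mem_cons.mp hm with h | h
        · exact hwp h.symm
        · exact absurd (hwrest prev h) (by omega)
      have hc : ((w :: rest).count prev : Int) = 0 := by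
        simp [List.count_eq_zero_of_not_mem hnomem]
      have hf : (w :: rest).filter (fun x => x ≠ prev) = w :: rest := by
        apply List.filter_eq_self.mpr
        intro x hx
        simp only [ne_eq, decide_eq_true_eq]
        intro hxe; subst hxe; exact hnomem hx
      rw [show runAcc prev n (w :: rest) = (if 2 ≤ n then [(prev, n)] else []) ++ runAcc w 1 rest from by simp [runAcc, hwp]]
      rw [hc, hf]
      simp [runsOf]

lemma runsOf_char : ∀ (l K : List Int),
    l.Pairwise (· ≥ ·) → K.Pairwise (· > ·) → (∀ k, k ∈ K ↔ k ∈ l) →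
    runsOf l = (K.filter (fun k => decide (2 ≤ (l.count k : Int)))).map
      (fun k => (k, (l.count k : Int))) := by
  suffices h : ∀ (n : Nat) (l K : List Int), l.length ≤ n →
      l.Pairwise (· ≥ ·) → K.Pairwise (· > ·) → (∀ k, k ∈ K ↔ k ∈ l) →
      runsOf l = (K.filter (fun k => decide (2 ≤ (l.count k : Int)))).map
        (fun k => (k, (l.count k : Int))) by
    intro l K h1 h2 h3
    exact h l.length l K le_rfl h1 h2 h3
  intro n
  induction n with
  | zero =>
    intro l K hlen _ _ hmem
    have hl : l = [] := List.length_eq_zero_iff.mp (Nat.le_zero.mp hlen)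
    subst hl
    have hK : K = [] := by
      cases K with
      | nil => rfl
      | cons a t => exact absurd ((hmem a).mp (by simp)) (by simp)
    subst hK; rfl
  | succ m ih0 =>
    intro l
    have ih : ∀ (l' : List Int), l'.length ≤ m → ∀ (K : List Int),
        l'.Pairwise (· ≥ ·) → K.Pairwise (· > ·) → (∀ k, k ∈ K ↔ k ∈ l') →
        runsOf l' = (K.filter (fun k => decide (2 ≤ (l'.count k : Int)))).map
          (fun k => (k, (l'.count k : Int))) := fun l' h K a b c => ih0 l' K h a b c
    match l with
    | [] =>
      intro K _ _ _ hmem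
      have hK : K = [] := by
        cases K with
        | nil => rfl
        | cons a t => exact absurd ((hmem a).mp (by simp)) (by simp)
      subst hK; rfl
    | v :: rest =>
      intro K hlen hpw hKgt hmem
      rcases List.pairwise_cons.mp hpw with ⟨hvrest, hrest⟩
      -- K = v :: K'
      have hvK : v ∈ K := (hmem v).mpr (by simp)
      match K, hvK with
      | k0 :: K', hvK =>
        rcases List.pairwise_cons.mp hKgt with ⟨hk0, hK'⟩
        have hk0v : v = k0 := by
          symm
          have hk0mem : k0 ∈ v :: rest := (hmem k0).mp (by simp)
          have hk0le : k0 ≤ v := by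
            rcases List.mem_cons.mp hk0mem with h | h
            · exact le_of_eq h
            · exact hvrest k0 h
          rcases List.mem_cons.mp hvK with h | h
          · exact h.symm
          · exact absurd (hk0 v h) (by omega)
        subst hk0v
        have hK'lt : ∀ k ∈ K', k < v := hk0
        -- filtered tail
        have hlf_pw : (rest.filter (fun x => x ≠ v)).Pairwise (· ≥ ·) := hrest.filter _
        have hlf_len : (rest.filter (fun x => x ≠ v)).length ≤ m := by
          have := List.length_filter_le (fun x => decide (x ≠ v)) rest
          simp only [List.length_cons] at hlen; omega
        have hmem' : ∀ k, k ∈ K' ↔ k ∈ rest.filter (fun x => x ≠ v) := by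
          intro k
          constructor
          · intro hk
            have hkv : k ≠ v := by have := hK'lt k hk; omega
            have : k ∈ v :: rest := (hmem k).mp (by simp [hk])
            rcases List.mem_cons.mp this with h | h
            · exact absurd h hkv
            · exact List.mem_filter.mpr ⟨h, by simpa using hkv⟩
          · intro hk
            rcases List.mem_filter.mp hk with ⟨hkr, hkv⟩
            have hkv' : k ≠ v := by simpa using hkv
            have : k ∈ v :: K' := (hmem k).mpr (by simp [hkr])
            rcases List.mem_cons.mp this with h | h
            · exact absurd h hkv'
            · exact h
        have hih := ih (rest.filter (fun x => x ≠ v)) hlf_len K' hlf_pw hK' hmem'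
        -- counts on the filtered tail agree with counts on l for k ≠ v
        have hcnt : ∀ k ∈ K', ((rest.filter (fun x => x ≠ v)).count k : Int) = ((v :: rest).count k : Int) := by
          intro k hk
          have hkv : k ≠ v := by have := hK'lt k hk; omega
          have h1 : (rest.filter (fun x => x ≠ v)).count k = rest.count k :=
            List.count_filter (by simpa using hkv)
          have h2 : (v :: rest).count k = rest.count k := by
            simp [Ne.symm hkv]
          rw [h1, h2]
        -- main count at v
        have hcv : ((v :: rest).count v : Int) = 1 + (rest.count v : Int) := by
          simp [List.count_cons]; ring
        -- LHS
        have hL : runsOf (v :: rest) = runAcc v 1 rest := rfl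
        rw [hL, runAcc_char rest v 1 hvrest hrest, hih]
        -- now both sides: head part + mapped filtered K'
        have hfilter_congr : K'.filter (fun k => decide (2 ≤ ((rest.filter (fun x => x ≠ v)).count k : Int)))
            = K'.filter (fun k => decide (2 ≤ (((v :: rest)).count k : Int))) := by
          apply List.filter_congr
          intro k hk
          rw [hcnt k hk]
        rw [hfilter_congr]
        have hmap_congr : (K'.filter (fun k => decide (2 ≤ (((v :: rest)).count k : Int)))).map
              (fun k => (k, ((rest.filter (fun x => x ≠ v)).count k : Int)))
            = (K'.filter (fun k => decide (2 ≤ (((v :: rest)).count k : Int)))).map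
              (fun k => (k, (((v :: rest)).count k : Int))) := by
          apply List.map_congr_left
          intro k hk
          rw [hcnt k (List.mem_of_mem_filter hk)]
        rw [hmap_congr]
        -- RHS head split
        rw [show (v :: K').filter (fun k => decide (2 ≤ (((v :: rest)).count k : Int)))
            = (if 2 ≤ (((v :: rest)).count v : Int) then [v] else []) ++ K'.filter (fun k => decide (2 ≤ (((v :: rest)).count k : Int))) from by
          by_cases h : (2 : Int) ≤ (((v :: rest)).count v : Int) <;>
            simp only [List.filter_cons, h, decide_true, decide_false, if_true, if_false, Bool.false_eq_true,
              List.singleton_append, List.nil_append]]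
        rw [List.map_append]
        congr 1
        by_cases h : (2 : Int) ≤ ((v :: rest)).count v
        · have h' : (2 : Int) ≤ 1 + (rest.count v : Int) := by rw [← hcv]; exact h
          simp only [h', if_pos, h, if_pos, List.map_cons, List.map_nil]
          rw [show (1 : Int) + (rest.count v : Int) = ((v :: rest).count v : Int) from hcv.symm]
        · have h' : ¬ (2 : Int) ≤ 1 + (rest.count v : Int) := by rw [← hcv]; exact h
          simp [h']
          omega

lemma clasifica_pares_long (pares : List (Int × Int)) (h : 3 ≤ pares.length) :
    clasifica_pares pares = [] := by
  have h0 : pares ≠ [] := by intro hh; subst hh; simp at h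
  have h1 : pares.length ≠ 1 := by omega
  have h2 : pares.length ≠ 2 := by omega
  simp [clasifica_pares, h0, h1, h2]

lemma clasifica_singleton (b c : Int) :
    clasifica_pares [(b, c)] = clasifica_pares_alt [(b, c)] := by
  simp only [clasifica_pares, clasifica_pares_alt, PySem.List.pyGetD_ofNat', List.getD]
  norm_num
  by_cases h2 : c = 2
  · subst h2; norm_num
  · by_cases h3 : c = 3
    · subst h3; norm_num
    · by_cases h4 : c = 4
      · subst h4; norm_num
      · simp [h2, h3, h4]

lemma clasifica_eq (vs KA KB : List Int) (hperm : KB.Perm KA) (hgt : KB.Pairwise (· > ·)) :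
    clasifica_pares ((KA.filter (fun k => decide (2 ≤ (vs.count k : Int)))).map
        (fun k => (k, (vs.count k : Int)))) =
      clasifica_pares_alt ((KB.filter (fun k => decide (2 ≤ (vs.count k : Int)))).map
        (fun k => (k, (vs.count k : Int)))) := by
  set c : Int → Bool := fun k => decide (2 ≤ (vs.count k : Int)) with hc
  have hFperm : (KB.filter c).Perm (KA.filter c) := hperm.filter c
  have hFgt : (KB.filter c).Pairwise (· > ·) := hgt.filter c
  match hFB : KB.filter c, hFperm, hFgt with
  | [], hFperm, _ =>
    have hFA : KA.filter c = [] := hFperm.symm.eq_nil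
    rw [hFA]
    rfl
  | [b], hFperm, _ =>
    have hFA : KA.filter c = [b] := List.Perm.eq_singleton hFperm.symm
    rw [hFA]
    exact clasifica_singleton b _
  | [b0, b1], hFperm, hFgt =>
    have hb : b1 < b0 := (List.pairwise_cons.mp hFgt).1 b1 (by simp)
    have hlen : (KA.filter c).length = 2 := hFperm.length_eq.symm
    match hFA : KA.filter c, hlen, hFperm with
    | [a0, a1], _, hFperm =>
      rcases perm_pair_cases hFperm with ⟨rfl, rfl⟩ | ⟨rfl, rfl⟩
      · simp only [clasifica_pares, clasifica_pares_alt, List.map_cons, List.map_nil,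
          PySem.List.pyGetD_ofNat', List.getD, List.length_cons, List.length_nil]
        norm_num
        rw [max_eq_left hb.le, min_eq_right hb.le]
        try simp
      · simp only [clasifica_pares, clasifica_pares_alt, List.map_cons, List.map_nil,
          PySem.List.pyGetD_ofNat', List.getD, List.length_cons, List.length_nil]
        norm_num
        rw [max_eq_right hb.le, min_eq_left hb.le]
        try simp
  | b0 :: b1 :: b2 :: brest, hFperm, _ =>
    have hlKA : 3 ≤ (KA.filter c).length := by
      rw [← hFperm.length_eq]; simp
    rw [clasifica_pares_long _ (by rw [List.length_map]; exact hlKA)]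
    rfl


lemma ports_eq (cartas : List (List (String × Int))) :
    get_pares_info cartas = get_pares_info_alt cartas := by
  simp only [get_pares_info, get_pares_info_alt]
  set vs := get_valores_mus cartas with hvs
  set S := PySem.List.sorted vs (fun x => x) true with hS
  set KB := PySem.List.sorted (PySem.Set.ofList vs) (fun x => x) true with hKB
  have hSperm : S.Perm vs := PySem.List.sorted_perm vs (fun x => x) true
  have hScnt : ∀ a, S.count a = vs.count a := fun a => hSperm.count_eq a
  have hSpw : S.Pairwise (· ≥ ·) := PySem.List.sorted_pairwise_rev vs (fun x => x)
  have hKBperm : KB.Perm (PySem.Set.ofList vs) :=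
    PySem.List.sorted_perm (PySem.Set.ofList vs) (fun x => x) true
  have hKBnodup : KB.Nodup := hKBperm.nodup_iff.mpr (PySem.Set.nodup_ofList vs)
  have hKBge : KB.Pairwise (· ≥ ·) := PySem.List.sorted_pairwise_rev (PySem.Set.ofList vs) (fun x => x)
  have hKBgt : KB.Pairwise (· > ·) :=
    (hKBge.and hKBnodup).imp (fun h => lt_of_le_of_ne h.1.le (Ne.symm h.2))
  have hmem : ∀ k, k ∈ KB ↔ k ∈ S := by
    intro k
    rw [hKBperm.mem_iff, hSperm.mem_iff, PySem.Set.mem_ofList]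
  rw [runsOf_char S KB hSpw hKBgt hmem]
  simp only [hScnt]
  rw [PySem.Dict.items_counter, List.filter_map]
  exact clasifica_eq vs _ _ hKBperm hKBgt

-- ===== VERDICT (by name: the statement is the Claim_ definition above) =====
theorem get_pares_info_spec : Claim_equal_get_pares_info := by
  intro cartas _ _
  show get_pares_info cartas = get_pares_info_alt cartas
  exact ports_eq cartas
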